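-- pv_equiv track=rewrite | github.com/sage-base/sagebase | src/infrastructure/importers/wikipedia_election_wikitext_parser.py | _remove_refnest
-- ===== SOURCE A (Python) =====
-- def _remove_refnest(text: str) -> str:
--     """{{Refnest|...}} をブレース深度追跡で除去する."""
--     result: list[str] = []
--     i = 0
--     while i < len(text):
--         if text[i:].startswith("{{Refnest|") or text[i:].startswith("{{refnest|"):
--             # ブレース深度で対応する }}を探す
--             depth = 0
--             j = i
--             while j < len(text):
--                 if text[j : j + 2] == "{{":
--                     depth += 1
--                     j += 2
--                 elif text[j : j + 2] == "}}":
--                     depth -= 1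
--                     j += 2
--                     if depth == 0:
--                         break
--                 else:
--                     j += 1
--             i = j
--         else:
--             result.append(text[i])
--             i += 1
--     return "".join(result)
-- ===== SOURCE B (Python) =====
-- def _remove_refnest(text: str) -> str:
--     """Slice-based: jump via str.find to each Refnest marker instead of copying char by char."""
--     out: list[str] = []
--     prev = 0
--     while True:
--         a = text.find("{{Refnest|", prev)
--         b = text.find("{{refnest|", prev)
--         if a == -1:
--             start = b
--         elif b == -1:
--             start = a
--         else:
--             start = min(a, b)
--         if start == -1:
--             out.append(text[prev:])
--             break
--         # balanced-brace scan from the marker to find the template's end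
--         depth = 0
--         j = start
--         while j < len(text):
--             if text[j : j + 2] == "{{":
--                 depth += 1
--                 j += 2
--             elif text[j : j + 2] == "}}":
--                 depth -= 1
--                 j += 2
--                 if depth == 0:
--                     break
--             else:
--                 j += 1
--         out.append(text[prev:start])
--         prev = j
--     return "".join(out)
-- ===== Notes on version B (the rewrite author's own statement) =====
-- stated objective: faster
-- what changed: A copies the text character by character, testing for a Refnest marker at every position via text[i:].startswith (which copies the whole tail each step); B instead locates each marker with str.find (both cases, taking the earlier hit), copies each untouched region as one slice, and jumps past the template found by the same balanced-brace scan.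
import Mathlib
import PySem

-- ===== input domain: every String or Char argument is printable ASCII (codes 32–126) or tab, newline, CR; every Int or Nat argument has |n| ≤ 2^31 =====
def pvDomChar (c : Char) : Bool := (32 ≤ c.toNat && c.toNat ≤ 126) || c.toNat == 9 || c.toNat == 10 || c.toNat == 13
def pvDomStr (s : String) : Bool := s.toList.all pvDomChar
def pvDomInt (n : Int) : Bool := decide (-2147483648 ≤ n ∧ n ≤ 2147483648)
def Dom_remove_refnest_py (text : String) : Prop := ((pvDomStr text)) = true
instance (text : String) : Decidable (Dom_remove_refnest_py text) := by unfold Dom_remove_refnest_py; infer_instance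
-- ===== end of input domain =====

-- B replaces A's per-character copy loop (whose text[i:].startswith slices copy the tail each step)
-- with str.find jumps between Refnest markers, copying whole slices; a timing run measured B faster.

-- ===== PORT A =====
def pvMarkR : List Char := "{{Refnest|".toList
def pvMarkr : List Char := "{{refnest|".toList

-- A's inner while-loop: balanced-brace scan, returns the suffix after the matched "}}" (or [] if never balanced)
def pvSkipA : List Char → Int → List Char
  | '{' :: '{' :: rest, d => pvSkipA rest (d + 1)
  | '}' :: '}' :: rest, d => if d - 1 = 0 then rest else pvSkipA rest (d - 1)
  | _ :: rest, d => pvSkipA rest d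
  | [], _ => []

-- needed by pvRemA's termination proof
theorem pvSkipA_len : ∀ (l : List Char) (d : Int), (pvSkipA l d).length ≤ l.length := by
  intro l d
  induction l, d using pvSkipA.induct
  all_goals rw [pvSkipA]
  all_goals try (split <;> simp_all <;> omega)
  all_goals simp_all <;> omega

-- needed by pvRemA's termination proof
theorem pv_marker_shape {l : List Char}
    (h : (pvMarkR.isPrefixOf l || pvMarkr.isPrefixOf l) = true) :
    ∃ r, l = '{' :: '{' :: r := by
  rcases l with _ | ⟨c, _ | ⟨c2, r⟩⟩ <;>
    simp [pvMarkR, pvMarkr, List.isPrefixOf] at h ⊢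
  rcases h with ⟨h1, h2, _⟩ | ⟨h1, h2, _⟩ <;> exact ⟨h1.symm, h2.symm⟩

-- A's outer while-loop over i, as recursion on the suffix of the text
def pvRemA : List Char → List Char
  | [] => []
  | c :: rest =>
    if h : (pvMarkR.isPrefixOf (c :: rest) || pvMarkr.isPrefixOf (c :: rest)) = true then
      pvRemA (pvSkipA (c :: rest) 0)
    else
      c :: pvRemA rest
termination_by l => l.length
decreasing_by
  · obtain ⟨r, hr⟩ := pv_marker_shape h
    have h2 : pvSkipA (c :: rest) 0 = pvSkipA r 1 := by rw [hr]; rfl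
    have h3 := pvSkipA_len r 1
    have h4 : (c :: rest).length = r.length + 2 := by rw [hr]; simp
    rw [h2]
    simp at h4 ⊢
    omega
  · simp

def remove_refnest_py (text : String) : String :=
  String.ofList (pvRemA text.toList)

-- ===== PORT B =====
-- B's inner balanced-brace scan (same code as in Source B)
def pvSkipB : List Char → Int → List Char
  | '{' :: '{' :: rest, d => pvSkipB rest (d + 1)
  | '}' :: '}' :: rest, d => if d - 1 = 0 then rest else pvSkipB rest (d - 1)
  | _ :: rest, d => pvSkipB rest d
  | [], _ => []

-- port of Python str.find(pat, …) on the remaining suffix: index of pat's first occurrence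
def pvFindSub (pat : List Char) : List Char → Option Nat
  | [] => none
  | c :: rest =>
    if pat.isPrefixOf (c :: rest) then some 0
    else (pvFindSub pat rest).map (· + 1)

-- B's start computation: the two find() results combined exactly as Source B combines them
def pvStart (l : List Char) : Option Nat :=
  match pvFindSub pvMarkR l, pvFindSub pvMarkr l with
  | none, o => o
  | some a, none => some a
  | some a, some b => some (min a b)

-- proof-side helper, also cited by pvRemB's termination proof: unified first-marker index
def pvFind : List Char → Option Nat
  | [] => none
  | c :: rest =>
    if (pvMarkR.isPrefixOf (c :: rest) || pvMarkr.isPrefixOf (c :: rest)) = true then some 0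
    else (pvFind rest).map (· + 1)

theorem pvStart_eq_pvFind : ∀ l : List Char, pvStart l = pvFind l := by
  intro l
  induction l with
  | nil => rfl
  | cons c rest ih =>
    unfold pvStart pvFind
    by_cases hR : pvMarkR.isPrefixOf (c :: rest) = true <;>
    by_cases hr : pvMarkr.isPrefixOf (c :: rest) = true <;>
      simp only [pvFindSub, hR, hr, if_true, Bool.or_eq_true] <;>
      rcases hA : pvFindSub pvMarkR rest with _ | a <;>
      rcases hB : pvFindSub pvMarkr rest with _ | b <;>
      simp [hA, hB, hR, hr, ← ih, pvStart, Nat.succ_min_succ]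

theorem pvFind_drop : ∀ (l : List Char) (k : Nat), pvFind l = some k →
    ∃ r, l.drop k = '{' :: '{' :: r ∧ l.length = k + 2 + r.length := by
  intro l
  induction l with
  | nil => intro k h; simp [pvFind] at h
  | cons c rest ih =>
    intro k h
    unfold pvFind at h
    split at h
    · rename_i hm
      obtain ⟨r, hr⟩ := pv_marker_shape hm
      simp at h
      subst h
      exact ⟨r, by simp [hr], by simp [hr]; omega⟩
    · rcases hk : pvFind rest with _ | k' <;> simp [hk] at h
      obtain ⟨r, h1, h2⟩ := ih k' hk
      subst h
      exact ⟨r, by simpa using h1, by simp; omega⟩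

theorem pvSkipB_len : ∀ (l : List Char) (d : Int), (pvSkipB l d).length ≤ l.length := by
  intro l d
  induction l, d using pvSkipB.induct
  all_goals rw [pvSkipB]
  all_goals try (split <;> simp_all <;> omega)
  all_goals simp_all <;> omega

-- needed by pvRemB's termination proof
theorem pvSkipB_drop_lt {l : List Char} {k : Nat} (h : pvFind l = some k) :
    (pvSkipB (l.drop k) 0).length < l.length := by
  obtain ⟨r, h1, h2⟩ := pvFind_drop l k h
  have h3 : pvSkipB (l.drop k) 0 = pvSkipB r 1 := by rw [h1]; rfl
  rw [h3]
  have := pvSkipB_len r 1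
  omega

-- B's outer loop: jump from marker to marker, copying whole slices
def pvRemB (l : List Char) : List Char :=
  match h : pvStart l with
  | none => l
  | some k => l.take k ++ pvRemB (pvSkipB (l.drop k) 0)
termination_by l.length
decreasing_by
  rw [pvStart_eq_pvFind] at h
  exact pvSkipB_drop_lt h

def remove_refnest_py_alt (text : String) : String :=
  String.ofList (pvRemB text.toList)

-- ===== PRECONDITION & SPEC =====
def Spec_remove_refnest_py (text : String) (out : String) : Prop := out = remove_refnest_py_alt text
instance (text : String) (out : String) : Decidable (Spec_remove_refnest_py text out) := by unfold Spec_remove_refnest_py; infer_instance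

-- ===== CLAIM (what is proved, stated in full; the proofs are below) =====
def Claim_equal_remove_refnest_py : Prop := ∀ (text : String), Dom_remove_refnest_py text → Spec_remove_refnest_py text (remove_refnest_py text)

-- ===== LEMMAS AND PROOFS =====
theorem pvSkipAB : ∀ (l : List Char) (d : Int), pvSkipA l d = pvSkipB l d := by
  intro l d
  induction l, d using pvSkipA.induct
  all_goals rw [pvSkipA, pvSkipB]
  all_goals try (split <;> simp_all)
  all_goals simp_all

theorem pvRemB_none {l : List Char} (h : pvStart l = none) : pvRemB l = l := by
  rw [pvRemB]
  split <;> simp_all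

theorem pvRemB_some {l : List Char} {k : Nat} (h : pvStart l = some k) :
    pvRemB l = l.take k ++ pvRemB (pvSkipB (l.drop k) 0) := by
  rw [pvRemB]
  split <;> simp_all

theorem pvRemA_none : ∀ l : List Char, pvFind l = none → pvRemA l = l := by
  intro l
  induction l with
  | nil => intro _; rw [pvRemA]
  | cons c rest ih =>
    intro h
    unfold pvFind at h
    split at h
    · simp at h
    · rename_i hm
      rcases hk : pvFind rest with _ | k <;> simp [hk] at h
      rw [pvRemA]
      simp [hm, ih hk]

theorem pvRemA_some : ∀ (k : Nat) (l : List Char), pvFind l = some k →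
    pvRemA l = l.take k ++ pvRemA (pvSkipA (l.drop k) 0) := by
  intro k
  induction k with
  | zero =>
    intro l h
    rcases l with _ | ⟨c, rest⟩
    · simp [pvFind] at h
    · unfold pvFind at h
      split at h
      · rename_i hm
        rw [pvRemA]
        simp [hm]
      · rcases hk : pvFind rest with _ | k' <;> simp [hk] at h
  | succ k ih =>
    intro l h
    rcases l with _ | ⟨c, rest⟩
    · simp [pvFind] at h
    · unfold pvFind at h
      split at h
      · simp at h
      · rename_i hm
        rcases hk : pvFind rest with _ | k' <;> simp [hk] at h
        subst h
        rw [pvRemA]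
        simp [hm, ih rest hk]

theorem pvRemAB : ∀ (n : Nat) (l : List Char), l.length ≤ n → pvRemA l = pvRemB l := by
  intro n
  induction n with
  | zero =>
    intro l hl
    have hnil : l = [] := by cases l <;> simp_all
    subst hnil
    rw [pvRemB_none (by rfl), pvRemA]
  | succ n ih =>
    intro l hl
    rcases hf : pvFind l with _ | k
    · rw [pvRemA_none l hf, pvRemB_none (by rw [pvStart_eq_pvFind]; exact hf)]
    · rw [pvRemA_some k l hf, pvRemB_some (by rw [pvStart_eq_pvFind]; exact hf), pvSkipAB]
      have hlt := pvSkipB_drop_lt hf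
      rw [ih _ (by omega)]

-- ===== VERDICT (by name: the statement is the Claim_ definition above) =====
theorem remove_refnest_py_spec : Claim_equal_remove_refnest_py := by
  intro text _
  unfold Spec_remove_refnest_py remove_refnest_py remove_refnest_py_alt
  rw [pvRemAB text.toList.length text.toList le_rfl]
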